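-- pv_equiv track=rewrite | github.com/fernandogonzalez11/ic1803-taller | práctica_ex4.py | p_i_pila_aux
-- ===== SOURCE A (Python) =====
-- def p_i_pila_aux(num):
--     if num == 0:
--         return (0, 0)
--
--     sig = p_i_pila_aux(num // 10)
--
--     if num % 2 == 0:
--         return (1 + sig[0], sig[1])
--     else:
--         return (sig[0], 1 + sig[1])
-- ===== SOURCE B (Python) =====
-- def p_i_pila_aux(num):
--     ev = 0
--     od = 0
--     while num != 0:
--         if num % 2 == 0:
--             ev += 1
--         else:
--             od += 1
--         num //= 10
--     return (ev, od)
-- ===== Notes on version B (the rewrite author's own statement) =====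
-- stated objective: simpler
-- what changed: Replaces the recursion over num//10 with an iterative while-loop keeping two running counters, returning the tallies directly.
import Mathlib
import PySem

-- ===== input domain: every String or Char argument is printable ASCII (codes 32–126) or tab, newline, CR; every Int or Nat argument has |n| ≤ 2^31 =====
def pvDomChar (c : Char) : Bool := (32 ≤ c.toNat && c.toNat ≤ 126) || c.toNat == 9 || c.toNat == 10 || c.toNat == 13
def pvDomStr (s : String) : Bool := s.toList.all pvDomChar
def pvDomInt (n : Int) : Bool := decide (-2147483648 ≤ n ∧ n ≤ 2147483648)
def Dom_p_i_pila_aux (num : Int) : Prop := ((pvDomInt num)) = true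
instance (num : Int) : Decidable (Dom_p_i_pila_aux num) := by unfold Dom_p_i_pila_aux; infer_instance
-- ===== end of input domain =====

-- B: iterative while-loop with two counters instead of A's recursion over num // 10 (simpler, O(1) space).
-- A raises RecursionError on negative num (num // 10 never reaches 0); Pre_ excludes num < 0.

-- ===== PORT A =====
-- 'if num ≤ 0' instead of 'if num == 0' is only a totality guard: for num < 0 Python A raises
-- (outside Pre_); for num ≥ 0 the branch coincides with Python's 'if num == 0'.
def p_i_pila_aux (num : Int) : Int × Int :=
  if _h : num ≤ 0 then (0, 0)
  else
    let sig := p_i_pila_aux (PySem.Int.floordiv num 10)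
    if PySem.Int.mod num 2 == 0 then (1 + sig.1, sig.2) else (sig.1, 1 + sig.2)
termination_by num.toNat
decreasing_by
  rw [PySem.Int.floordiv_eq_ediv_of_pos (by omega)]
  omega

-- ===== PORT B =====
-- while-loop of Source B as a tail recursion over the loop state (num, ev, od); 'num ≤ 0' is the
-- same totality guard (Python's 'while num != 0' never exits for num < 0, outside Pre_).
def pvLoop_p_i_pila_aux (num ev od : Int) : Int × Int :=
  if _h : num ≤ 0 then (ev, od)
  else if PySem.Int.mod num 2 == 0 then
    pvLoop_p_i_pila_aux (PySem.Int.floordiv num 10) (ev + 1) od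
  else
    pvLoop_p_i_pila_aux (PySem.Int.floordiv num 10) ev (od + 1)
termination_by num.toNat
decreasing_by
  all_goals rw [PySem.Int.floordiv_eq_ediv_of_pos (by omega)]
  all_goals omega

def p_i_pila_aux_alt (num : Int) : Int × Int :=
  pvLoop_p_i_pila_aux num 0 0

-- ===== PRECONDITION & SPEC =====
-- Pre_ excludes negative num, on which Python A raises RecursionError (infinite recursion).
def Pre_p_i_pila_aux (num : Int) : Prop := 0 ≤ num
instance (num : Int) : Decidable (Pre_p_i_pila_aux num) := by unfold Pre_p_i_pila_aux; infer_instance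
def pvWitness_p_i_pila_aux : Int := 1234

def Spec_p_i_pila_aux (num : Int) (out : Int × Int) : Prop := out = p_i_pila_aux_alt num
instance (num : Int) (out : Int × Int) : Decidable (Spec_p_i_pila_aux num out) := by unfold Spec_p_i_pila_aux; infer_instance

-- ===== CLAIM (what is proved, stated in full; the proofs are below) =====
def Claim_equal_p_i_pila_aux : Prop := ∀ (num : Int), Dom_p_i_pila_aux num → Pre_p_i_pila_aux num → Spec_p_i_pila_aux num (p_i_pila_aux num)

-- ===== LEMMAS AND PROOFS =====

-- Loop invariant: the loop adds A's tallies to the accumulators.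
theorem pvLoop_eq (num : Int) (ev od : Int) :
    pvLoop_p_i_pila_aux num ev od = (ev + (p_i_pila_aux num).1, od + (p_i_pila_aux num).2) := by
  induction num, ev, od using pvLoop_p_i_pila_aux.induct with
  | case1 num ev od h =>
    rw [pvLoop_p_i_pila_aux, p_i_pila_aux.eq_def]
    simp [h]
  | case2 num ev od h heq ih =>
    rw [pvLoop_p_i_pila_aux, p_i_pila_aux.eq_def]
    simp only [dif_neg h, heq, if_true]
    rw [ih]
    simp only [Prod.mk.injEq]
    exact ⟨by ring, trivial⟩
  | case3 num ev od h heq ih =>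
    rw [pvLoop_p_i_pila_aux, p_i_pila_aux.eq_def]
    simp only [dif_neg h, heq, Bool.false_eq_true, if_false]
    rw [ih]
    simp only [Prod.mk.injEq]
    exact ⟨trivial, by ring⟩

-- ===== VERDICT (by name: the statement is the Claim_ definition above) =====
theorem p_i_pila_aux_spec : Claim_equal_p_i_pila_aux := by
  intro num _ _
  unfold Spec_p_i_pila_aux p_i_pila_aux_alt
  rw [pvLoop_eq]
  simp
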